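-- pv_equiv track=rewrite | github.com/searchs/algorithms | examples/countdown.py | least_missing
-- ===== SOURCE A (Python) =====
-- def least_missing(alist):
--     if len(alist) < 2:
--         return alist[0] + 1
--     else:
--         n = min(alist)
--         if n <= 0:
--             return 1
--         while n in alist:
--             n += 1
--             continue
--     return n
-- ===== SOURCE B (Python) =====
-- def least_missing(alist):
--     if len(alist) < 2:
--         return alist[0] + 1
--     n = min(alist)
--     if n <= 0:
--         return 1
--     for x in sorted(alist):
--         if x == n:
--             n += 1
--         elif x > n:
--             break
--     return n
-- ===== Notes on version B (the rewrite author's own statement) =====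
-- stated objective: alternative
-- what changed: Replaced the repeated 'n in alist' membership scans with a sort followed by a single forward sweep over sorted(alist), incrementing the candidate on equal values and skipping duplicates; it trades repeated scans for one sort, with no measured speedup.
-- outside the precondition, e.g. on least_missing([]): A raises IndexError, B raises IndexError
import Mathlib
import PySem

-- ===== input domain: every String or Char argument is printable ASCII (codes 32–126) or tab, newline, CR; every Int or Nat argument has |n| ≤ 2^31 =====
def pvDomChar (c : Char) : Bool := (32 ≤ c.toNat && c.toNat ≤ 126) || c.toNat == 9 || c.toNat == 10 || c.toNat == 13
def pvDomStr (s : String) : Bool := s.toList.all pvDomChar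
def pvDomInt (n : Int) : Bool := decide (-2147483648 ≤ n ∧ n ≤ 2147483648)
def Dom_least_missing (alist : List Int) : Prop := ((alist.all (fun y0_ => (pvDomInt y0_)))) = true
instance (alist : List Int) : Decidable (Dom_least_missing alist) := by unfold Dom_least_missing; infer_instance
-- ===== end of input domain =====

-- B replaces A's repeated `n in alist` membership scans by one sort followed by a single forward sweep (alternative algorithm, same measured cost).

-- ===== PORT A =====
-- termination helpers for A's while-loop: when n is in the list, the count of elements ≥ n strictly drops as n grows
theorem pvFilterLe (xs : List Int) (n : Int) :
    (xs.filter (fun x => decide (n + 1 ≤ x))).length ≤ (xs.filter (fun x => decide (n ≤ x))).length := by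
  induction xs with
  | nil => simp
  | cons y ys ih =>
    by_cases h2 : n ≤ y
    · by_cases h1 : n + 1 ≤ y
      · simp only [List.filter_cons, decide_eq_true h1, decide_eq_true h2, if_true, List.length_cons]
        omega
      · simp only [List.filter_cons, decide_eq_false h1, decide_eq_true h2, if_true, Bool.false_eq_true, if_false, List.length_cons]
        omega
    · have h1 : ¬ (n + 1 ≤ y) := by omega
      simp only [List.filter_cons, decide_eq_false h1, decide_eq_false h2, Bool.false_eq_true, if_false]
      exact ih

theorem pvFilterDrop (xs : List Int) (n : Int) (h : n ∈ xs) :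
    (xs.filter (fun x => decide (n + 1 ≤ x))).length < (xs.filter (fun x => decide (n ≤ x))).length := by
  induction xs with
  | nil => cases h
  | cons y ys ih =>
    have hle := pvFilterLe ys n
    rcases List.mem_cons.mp h with hy | hys
    · subst hy
      have h1 : ¬ (n + 1 ≤ n) := by omega
      have h2 : n ≤ n := le_rfl
      simp only [List.filter_cons, decide_eq_false h1, decide_eq_true h2, if_true, Bool.false_eq_true, if_false, List.length_cons]
      omega
    · have ih' := ih hys
      by_cases h2 : n ≤ y
      · by_cases h1 : n + 1 ≤ y
        · simp only [List.filter_cons, decide_eq_true h1, decide_eq_true h2, if_true, List.length_cons]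
          omega
        · simp only [List.filter_cons, decide_eq_false h1, decide_eq_true h2, if_true, Bool.false_eq_true, if_false, List.length_cons]
          omega
      · have h1 : ¬ (n + 1 ≤ y) := by omega
        simp only [List.filter_cons, decide_eq_false h1, decide_eq_false h2, Bool.false_eq_true, if_false]
        exact ih'

-- A's while-loop: `while n in alist: n += 1`
def lmLoopA (alist : List Int) (n : Int) : Int :=
  if h : n ∈ alist then lmLoopA alist (n + 1) else n
termination_by (alist.filter (fun x => decide (n ≤ x))).length
decreasing_by exact pvFilterDrop alist n h

def least_missing (alist : List Int) : Int :=
  if alist.length < 2 then (PySem.List.pyGet? alist 0).getD 0 + 1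
  else
    let n := (PySem.List.min? alist (fun x => x)).getD 0
    if n ≤ 0 then 1
    else lmLoopA alist n

-- ===== PORT B =====
-- B's for-loop over sorted(alist): equal → advance candidate, greater → break, smaller (duplicate) → skip
def lmSweep (n : Int) : List Int → Int
  | [] => n
  | x :: xs => if x = n then lmSweep (n + 1) xs else if n < x then n else lmSweep n xs

def least_missing_alt (alist : List Int) : Int :=
  if alist.length < 2 then (PySem.List.pyGet? alist 0).getD 0 + 1
  else
    let n := (PySem.List.min? alist (fun x => x)).getD 0
    if n ≤ 0 then 1
    else lmSweep n (PySem.List.sorted alist (fun x => x) false)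

-- ===== PRECONDITION & SPEC =====
-- Pre_ excludes only the empty list, on which A (and B) raise IndexError at alist[0].
def Pre_least_missing (alist : List Int) : Prop := alist ≠ []
instance (alist : List Int) : Decidable (Pre_least_missing alist) := by unfold Pre_least_missing; infer_instance
def pvWitness_least_missing : List Int := [1, 2, 4]

def Spec_least_missing (alist : List Int) (out : Int) : Prop := out = least_missing_alt alist
instance (alist : List Int) (out : Int) : Decidable (Spec_least_missing alist out) := by unfold Spec_least_missing; infer_instance

-- ===== CLAIM (what is proved, stated in full; the proofs are below) =====
def Claim_equal_least_missing : Prop := ∀ (alist : List Int), Dom_least_missing alist → Pre_least_missing alist → Spec_least_missing alist (least_missing alist)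

-- ===== LEMMAS AND PROOFS =====

-- A's loop depends only on which integers ≥ n are members
theorem lmLoopA_congr (s t : List Int) (n : Int) (h : ∀ m : Int, n ≤ m → (m ∈ s ↔ m ∈ t)) :
    lmLoopA s n = lmLoopA t n := by
  by_cases hn : n ∈ s
  · have hnt : n ∈ t := (h n le_rfl).mp hn
    conv_lhs => rw [lmLoopA]
    conv_rhs => rw [lmLoopA]
    rw [dif_pos hn, dif_pos hnt]
    exact lmLoopA_congr s t (n + 1) (fun m hm => h m (by omega))
  · have hnt : n ∉ t := fun ht => hn ((h n le_rfl).mpr ht)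
    conv_lhs => rw [lmLoopA]
    conv_rhs => rw [lmLoopA]
    rw [dif_neg hn, dif_neg hnt]
termination_by (s.filter (fun x => decide (n ≤ x))).length
decreasing_by exact pvFilterDrop s n hn

-- B's sweep over a sorted list computes exactly A's loop on that list
theorem lmSweep_eq (s : List Int) : ∀ n : Int, s.Pairwise (· ≤ ·) → lmSweep n s = lmLoopA s n := by
  induction s with
  | nil =>
    intro n _
    rw [lmSweep, lmLoopA]
    simp
  | cons x xs ih =>
    intro n hp
    have hp' : xs.Pairwise (· ≤ ·) := hp.tail
    have hxall : ∀ y ∈ xs, x ≤ y := fun y hy => List.rel_of_pairwise_cons hp hy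
    by_cases hx : x = n
    · have h1 : lmSweep n (x :: xs) = lmSweep (n + 1) xs := by simp [lmSweep, hx]
      have hnx : n ∈ x :: xs := by simp [hx]
      have h2 : lmLoopA (x :: xs) n = lmLoopA (x :: xs) (n + 1) := by
        conv_lhs => rw [lmLoopA]
        rw [dif_pos hnx]
      rw [h1, h2, ih (n + 1) hp']
      refine lmLoopA_congr xs (x :: xs) (n + 1) (fun m hm => ?_)
      have hne : m ≠ x := by omega
      simp [List.mem_cons, hne]
    · by_cases hlt : n < x
      · have h1 : lmSweep n (x :: xs) = n := by simp [lmSweep, hx, hlt]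
        have hnm : n ∉ x :: xs := by
          intro hmem
          rcases List.mem_cons.mp hmem with he | hns
          · exact hx he.symm
          · have := hxall n hns; omega
        rw [h1, lmLoopA, dif_neg hnm]
      · have h1 : lmSweep n (x :: xs) = lmSweep n xs := by simp [lmSweep, hx, hlt]
        rw [h1, ih n hp']
        refine lmLoopA_congr xs (x :: xs) n (fun m hm => ?_)
        have hne : m ≠ x := by omega
        simp [List.mem_cons, hne]

-- ===== VERDICT (by name: the statement is the Claim_ definition above) =====
theorem least_missing_spec : Claim_equal_least_missing := by
  intro alist _ _
  unfold Spec_least_missing least_missing least_missing_alt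
  by_cases hlen : alist.length < 2
  · simp [hlen]
  · simp only [hlen, if_false]
    set n := (PySem.List.min? alist (fun x => x)).getD 0 with hn
    by_cases hnp : n ≤ 0
    · simp [hnp]
    · simp only [hnp, if_false]
      rw [lmSweep_eq _ n (PySem.List.sorted_pairwise alist (fun x => x))]
      exact lmLoopA_congr alist (PySem.List.sorted alist (fun x => x) false) n
        (fun m _ => (PySem.List.mem_sorted alist (fun x => x) false m).symm)
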